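-- pv_equiv track=rewrite | github.com/meggangreen/advent-code-2017 | files/09.py | calc_total_score
-- ===== SOURCE A (Python) =====
-- def calc_total_score(stream):
--     total = 0
--     group = 0
--     for s in stream:
--         if s == '{':
--             group += 1
--             total += group
--         if s == '}':
--             group += -1
--
--     return total
-- ===== SOURCE B (Python) =====
-- def calc_total_score(stream):
--     # total = sum of depths at the '{'s = n(n+1)/2 - (# of ('}','{') ordered pairs),
--     # since the depth of each open is 1 + (opens before it) - (closes before it) and
--     # the opens-before terms over all n opens sum to n(n-1)/2. One reverse scan counts
--     # both n (opens) and the crossing pairs (closes each paired with every later open).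
--     crossings = 0
--     opens = 0
--     for c in reversed(stream):
--         if c == '{':
--             opens += 1
--         elif c == '}':
--             crossings += opens
--     return opens * (opens + 1) // 2 - crossings
-- ===== Notes on version B (the rewrite author's own statement) =====
-- stated objective: alternative
-- what changed: Replaces A's running-depth accumulation with a counting identity: total = n(n+1)/2 for n = count of '{' minus the number of ('}','{') ordered pairs, the latter counted by a single reverse scan tracking opens seen so far.
import Mathlib
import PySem

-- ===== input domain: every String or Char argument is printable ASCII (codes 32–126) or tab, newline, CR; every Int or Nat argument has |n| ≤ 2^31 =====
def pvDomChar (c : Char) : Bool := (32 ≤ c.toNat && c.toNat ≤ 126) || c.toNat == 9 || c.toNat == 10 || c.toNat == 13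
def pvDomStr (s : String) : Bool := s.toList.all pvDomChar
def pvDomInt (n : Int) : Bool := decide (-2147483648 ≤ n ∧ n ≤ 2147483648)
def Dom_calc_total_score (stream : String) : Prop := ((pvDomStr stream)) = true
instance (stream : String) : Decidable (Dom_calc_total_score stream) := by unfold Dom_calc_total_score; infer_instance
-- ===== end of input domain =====

-- B replaces A's running-depth accumulation with the identity total = n(n+1)/2 - crossings
-- (n = number of '{', crossings = ('}','{') ordered pairs, counted by one reverse scan); same cost.

-- ===== PORT A =====
-- one pass with state (total, group); '{' bumps group then adds it to total, '}' lowers group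
def pvStepA (st : Int × Int) (s : Char) : Int × Int :=
  let st := if s = '{' then (st.1 + (st.2 + 1), st.2 + 1) else st
  if s = '}' then (st.1, st.2 + (-1)) else st

def calc_total_score (stream : String) : Int :=
  (stream.toList.foldl pvStepA (0, 0)).1

-- ===== PORT B =====
-- the reverse-scan step: state (crossings, opens); '{' counts an open, '}' pairs with every open seen (i.e. every later open)
def pvStepB (st : Int × Int) (c : Char) : Int × Int :=
  if c = '{' then (st.1, st.2 + 1) else if c = '}' then (st.1 + st.2, st.2) else st

def calc_total_score_alt (stream : String) : Int :=
  let p := stream.toList.reverse.foldl pvStepB (0, 0)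
  PySem.Int.floordiv (p.2 * (p.2 + 1)) 2 - p.1

-- ===== PRECONDITION & SPEC =====
def Spec_calc_total_score (stream : String) (out : Int) : Prop := out = calc_total_score_alt stream
instance (stream : String) (out : Int) : Decidable (Spec_calc_total_score stream out) := by unfold Spec_calc_total_score; infer_instance

-- ===== CLAIM (what is proved, stated in full; the proofs are below) =====
def Claim_equal_calc_total_score : Prop := ∀ (stream : String), Dom_calc_total_score stream → Spec_calc_total_score stream (calc_total_score stream)

-- ===== LEMMAS AND PROOFS =====

theorem pvStepB_open (st : Int × Int) : pvStepB st '{' = (st.1, st.2 + 1) := by simp [pvStepB]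
theorem pvStepB_close (st : Int × Int) : pvStepB st '}' = (st.1 + st.2, st.2) := by simp [pvStepB]
theorem pvStepB_other (st : Int × Int) (c : Char) (h1 : c ≠ '{') (h2 : c ≠ '}') :
    pvStepB st c = st := by simp [pvStepB, h1, h2]

-- the opens component of B's scan counts the '{'s
theorem pvOpens (cs : List Char) :
    (cs.foldr (fun c st => pvStepB st c) (0, 0)).2 = (cs.count '{' : Int) := by
  induction cs with
  | nil => simp
  | cons c cs ih =>
    rw [List.foldr_cons]
    by_cases h1 : c = '{'
    · subst h1
      rw [pvStepB_open, List.count_cons_self]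
      simp [ih]
    · by_cases h2 : c = '}'
      · subst h2
        rw [pvStepB_close, List.count_cons_of_ne h1]
        exact ih
      · rw [pvStepB_other _ _ h1 h2, List.count_cons_of_ne h1]
        exact ih

-- main invariant: twice A's running total from (total, group), in terms of n and the crossing count
theorem pvKey (cs : List Char) : ∀ (total group : Int),
    2 * (cs.foldl pvStepA (total, group)).1
      = 2 * total + 2 * group * (cs.count '{' : Int)
        + (cs.count '{' : Int) * ((cs.count '{' : Int) + 1)
        - 2 * (cs.foldr (fun c st => pvStepB st c) (0, 0)).1 := by
  induction cs with
  | nil => intro t g; simp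
  | cons c cs ih =>
    intro t g
    rw [List.foldl_cons, List.foldr_cons]
    by_cases h1 : c = '{'
    · subst h1
      rw [show pvStepA (t, g) '{' = (t + (g + 1), g + 1) from by simp [pvStepA]]
      rw [ih, pvStepB_open, List.count_cons_self]
      push_cast
      ring
    · by_cases h2 : c = '}'
      · subst h2
        rw [show pvStepA (t, g) '}' = (t, g + -1) from by simp [pvStepA]]
        rw [ih, pvStepB_close, List.count_cons_of_ne h1,
          pvOpens]
        ring
      · rw [show pvStepA (t, g) c = (t, g) from by simp [pvStepA, h1, h2]]
        rw [ih, pvStepB_other _ _ h1 h2, List.count_cons_of_ne h1]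

-- exact halving: 2k // 2 = k for Python floor division
theorem pvHalf (k : Int) : PySem.Int.floordiv (2 * k) 2 = k := by
  rw [PySem.Int.floordiv_eq_ediv_of_pos (by omega)]; omega

-- ===== VERDICT (by name: the statement is the Claim_ definition above) =====
theorem calc_total_score_spec : Claim_equal_calc_total_score := by
  intro stream _
  unfold Spec_calc_total_score calc_total_score calc_total_score_alt
  simp only [List.foldl_reverse]
  rw [pvOpens]
  have h := pvKey stream.toList 0 0
  set X := (stream.toList.foldr (fun c st => pvStepB st c) (0, 0)).1 with hX
  have hnn : (stream.toList.count '{' : Int) * ((stream.toList.count '{' : Int) + 1)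
      = 2 * ((stream.toList.foldl pvStepA (0, 0)).1 + X) := by omega
  rw [hnn, pvHalf]
  ring
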